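-- pv_equiv track=rewrite | github.com/algo-itzy/algo-itzy | Programmers/표_편집/표_편집-jiwoong.py | solution
-- ===== SOURCE A (Python) =====
-- from collections import deque
--
-- def solution(n, k, cmd):
--     arr = deque([i for i in range(n)])
--     tmp = deque()
--
--     for i in cmd:
--         s_arr = i.split()
--
--         if len(s_arr) > 1:
--             word, x = s_arr[0], int(s_arr[1])
--             if word == "D":
--                 k += x
--             elif word == "U":
--                 k -= x
--         else:
--             word = s_arr[0]
--             if word == "C":
--                 tmp.append((k, arr[k]))
--                 arr.remove(arr[k])
--                 if k == len(arr):
--                     k -= 1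
--             elif word == "Z":
--                 ok, ox = tmp.pop()
--                 if ok <= k:
--                     k += 1
--                 arr.insert(ok, ox)
--
--     words = set(arr)
--     result = ""
--
--     for i in range(n):
--         if i in words:
--             result += 'O'
--         else:
--             result += 'X'
--     return result
-- ===== SOURCE B (Python) =====
-- def _parse(c):
--     # stage 1: normalize one command; "U x" becomes a negative move
--     t = c.split()
--     if len(t) > 1:
--         x = int(t[1])
--         if t[0] == "D":
--             return ("M", x)
--         if t[0] == "U":
--             return ("M", -x)
--         return ("N", 0)
--     if t[0] == "C":
--         return ("C", 0)
--     if t[0] == "Z":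
--         return ("Z", 0)
--     return ("N", 0)
--
--
-- def _select(alive, k):
--     # index of the k-th live row (0-based) in the occupancy array
--     for i, a in enumerate(alive):
--         if a:
--             if k == 0:
--                 return i
--             k -= 1
--     raise IndexError("cursor out of range")
--
--
-- def solution(n, k, cmd):
--     # stage 1: parse every command; stage 2: run them on a fixed occupancy
--     # bit-array (no shifting deque) with a stack of (cursor, row) pairs
--     ops = [_parse(c) for c in cmd]
--     alive = [True] * n
--     size = n
--     stk = []
--     for w, x in ops:
--         if w == "M":
--             k += x
--         elif w == "C":
--             v = _select(alive, k)
--             alive[v] = False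
--             stk.append((k, v))
--             size -= 1
--             k -= (k == size)
--         elif w == "Z":
--             ok, ov = stk.pop()
--             k += (ok <= k)
--             alive[ov] = True
--             size += 1
--     return ''.join('O' if a else 'X' for a in alive)
-- ===== Notes on version B (the rewrite author's own statement) =====
-- stated objective: alternative
-- what changed: B first parses all commands into normalized ops (merging 'U x' into a negative move), then runs them on a fixed boolean occupancy array - delete rank-selects the k-th live bit and clears it, restore sets it back - instead of A's deque that is physically shifted by remove/insert plus a final membership set; the answer is read directly off the array.
-- outside the precondition, e.g. on solution(5, -1, ['C']): A returns 'OOOOX', B raises IndexError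
import Mathlib
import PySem

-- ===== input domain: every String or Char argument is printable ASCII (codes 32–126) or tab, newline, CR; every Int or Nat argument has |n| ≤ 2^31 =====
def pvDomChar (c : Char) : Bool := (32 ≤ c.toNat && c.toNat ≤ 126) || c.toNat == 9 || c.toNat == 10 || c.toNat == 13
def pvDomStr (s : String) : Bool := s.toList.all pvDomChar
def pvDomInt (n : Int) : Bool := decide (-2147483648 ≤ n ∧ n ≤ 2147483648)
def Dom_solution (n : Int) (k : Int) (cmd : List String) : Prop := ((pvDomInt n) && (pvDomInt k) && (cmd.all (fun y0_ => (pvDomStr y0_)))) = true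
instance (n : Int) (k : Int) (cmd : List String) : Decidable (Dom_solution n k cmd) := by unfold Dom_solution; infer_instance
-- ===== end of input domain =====

-- B stages the work: parse every command first into a normalized op ("U x" becomes a negative
-- move), then run the ops on a fixed boolean occupancy array (rank-select on delete, set the bit
-- back on restore) instead of A's physically shifted deque and final membership set.

-- ===== PORT A =====
-- one command applied to A's state (arr, tmp, k); none = the Python raised
def solArrStep (st : Option (List Int × List (Int × Int) × Int)) (s : String) :
    Option (List Int × List (Int × Int) × Int) :=
  match st with
  | none => none
  | some (arr, tmp, k) =>
    match PySem.Str.split₀ s with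
    | [] => none                                  -- s_arr[0]: IndexError
    | [word] =>
      if word = "C" then
        match PySem.List.pyGet? arr k with
        | none => none                            -- arr[k]: IndexError
        | some v =>
          match PySem.List.remove? arr v with
          | none => none                          -- arr.remove: ValueError (unreachable here)
          | some arr' =>
            some (arr', tmp ++ [(k, v)], if k = (arr'.length : Int) then k - 1 else k)
      else if word = "Z" then
        match PySem.List.pop? tmp with
        | none => none                            -- tmp.pop(): IndexError on empty deque
        | some ((ok, ox), tmp') =>
          some (PySem.List.insert arr ok ox, tmp', if ok ≤ k then k + 1 else k)
      else some (arr, tmp, k)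
    | _word :: xs :: _ =>
      match PySem.Int.ofStr? xs with
      | none => none                              -- int(s_arr[1]): ValueError
      | some x =>
        if _word = "D" then some (arr, tmp, k + x)
        else if _word = "U" then some (arr, tmp, k - x)
        else some (arr, tmp, k)

def solution (n : Int) (k : Int) (cmd : List String) : String :=
  match cmd.foldl solArrStep (some (PySem.List.pyRange 0 n 1, [], k)) with
  | none => ""                                    -- Python raised: value unclaimed (outside Pre_)
  | some (arr, _, _) =>
    let words := PySem.Set.ofList arr
    String.ofList ((PySem.List.pyRange 0 n 1).foldl
      (fun r i => r ++ (if i ∈ words then ['O'] else ['X'])) [])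

-- ===== PORT B =====
-- B's normalized ops
inductive POp : Type
  | mov : Int → POp          -- ("M", x)
  | cut : POp                -- ("C", 0)
  | undo : POp               -- ("Z", 0)
  | nop : POp                -- ("N", 0)
deriving DecidableEq, Repr

-- _parse: stage 1 on one command; none = the Python raised (empty split / bad int)
def parseOp (c : String) : Option POp :=
  match PySem.Str.split₀ c with
  | [] => none                                    -- t[0]: IndexError
  | t0 :: t1 :: _ =>
    match PySem.Int.ofStr? t1 with
    | none => none                                -- int(t[1]): ValueError
    | some x =>
      if t0 = "D" then some (.mov x)
      else if t0 = "U" then some (.mov (-x))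
      else some .nop
  | [t0] =>
    if t0 = "C" then some .cut
    else if t0 = "Z" then some .undo
    else some .nop

-- the list comprehension [_parse(c) for c in cmd]
def parseAll : List String → Option (List POp)
  | [] => some []
  | c :: t =>
    match parseOp c with
    | none => none
    | some p =>
      match parseAll t with
      | none => none
      | some ps => some (p :: ps)

-- _select: index of the k-th live slot (B's scan, decrementing k), none = IndexError
def selectAlt : List Bool → Nat → Int → Option Nat
  | [], _, _ => none
  | a :: t, i, k =>
    if a then (if k = 0 then some i else selectAlt t (i + 1) (k - 1))
    else selectAlt t (i + 1) k

-- stage 2: one op applied to B's state (alive, size, stk, k)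
def runOp (st : Option (List Bool × Int × List (Int × Int) × Int)) (c : POp) :
    Option (List Bool × Int × List (Int × Int) × Int) :=
  match st with
  | none => none
  | some (alive, size, stk, k) =>
    match c with
    | .mov x => some (alive, size, stk, k + x)
    | .cut =>
      match selectAlt alive 0 k with
      | none => none                              -- _select raises IndexError
      | some v =>
        some (alive.set v false, size - 1, stk ++ [(k, (v : Int))],
              if k = size - 1 then k - 1 else k)  -- k -= (k == size) after size -= 1
    | .undo =>
      match PySem.List.pop? stk with
      | none => none                              -- stk.pop(): IndexError on empty list
      | some ((ok, ov), stk') =>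
        some (PySem.List.pySetD alive ov true, size + 1, stk',
              if ok ≤ k then k + 1 else k)        -- k += (ok <= k)
    | .nop => some (alive, size, stk, k)

def solution_alt (n : Int) (k : Int) (cmd : List String) : String :=
  match parseAll cmd with
  | none => ""                                    -- Python raised while parsing: outside Pre_
  | some ops =>
    match ops.foldl runOp (some (List.replicate n.toNat true, n, [], k)) with
    | none => ""
    | some (alive, _, _, _) => String.ofList (alive.map (fun a => if a then 'O' else 'X'))

-- ===== PRECONDITION & SPEC =====
-- control-state checker for Pre_: tracks only the cursor, the live count and the stored cursor
-- positions (no table contents); some = the run is valid so far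
def preStep (st : Option (Int × Int × List Int)) (s : String) : Option (Int × Int × List Int) :=
  match st with
  | none => none
  | some (k, size, oks) =>
    match PySem.Str.split₀ s with
    | [] => none
    | [w] =>
      if w = "C" then
        if 0 ≤ k ∧ k < size then
          some ((if k = size - 1 then k - 1 else k), size - 1, oks ++ [k])
        else none
      else if w = "Z" then
        match PySem.List.pop? oks with
        | none => none
        | some (ok, oks') => some ((if ok ≤ k then k + 1 else k), size + 1, oks')
      else some (k, size, oks)
    | _w :: xs :: _ =>
      match PySem.Int.ofStr? xs with
      | none => none
      | some x =>
        if _w = "D" then some (k + x, size, oks)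
        else if _w = "U" then some (k - x, size, oks)
        else some (k, size, oks)

-- Pre_ excludes runs where a command raises (blank command, unparsable count, delete past the end,
-- restore with nothing deleted) and runs that delete at a NEGATIVE cursor, where A's value comes
-- from Python's accidental negative-index wraparound and B raises IndexError.
def Pre_solution (n : Int) (k : Int) (cmd : List String) : Prop :=
  (cmd.foldl preStep (some (k, n, []))).isSome = true
instance (n : Int) (k : Int) (cmd : List String) : Decidable (Pre_solution n k cmd) := by
  unfold Pre_solution; infer_instance

def pvWitness_solution : Int × Int × List String := (2, 0, ["C", "Z", "D 1"])

def Spec_solution (n : Int) (k : Int) (cmd : List String) (out : String) : Prop := out = solution_alt n k cmd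
instance (n : Int) (k : Int) (cmd : List String) (out : String) : Decidable (Spec_solution n k cmd out) := by unfold Spec_solution; infer_instance

-- ===== CLAIM (what is proved, stated in full; the proofs are below) =====
def Claim_equal_solution : Prop := ∀ (n : Int) (k : Int) (cmd : List String), Dom_solution n k cmd → Pre_solution n k cmd → Spec_solution n k cmd (solution n k cmd)

-- ===== LEMMAS AND PROOFS =====

-- number of live slots
def cntT (l : List Bool) : Nat := l.countP (fun b => b)

-- the list of live indices, as Ints, starting the numbering at i
def trueIdxFrom : List Bool → Nat → List Int
  | [], _ => []
  | a :: t, i => if a then (i : Int) :: trueIdxFrom t (i + 1) else trueIdxFrom t (i + 1)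

-- stack sanity: each entry restores, in LIFO order, a dead slot at its recorded rank
def GoodR : List Bool → List (Int × Int) → Prop
  | _, [] => True
  | l, (ok, ov) :: r =>
    ∃ d : Nat, ov = (d : Int) ∧ d < l.length ∧ l[d]? = some false ∧
      ok = (((l.take d).countP (fun b => b) : Nat) : Int) ∧ GoodR (l.set d true) r

-- the simulation relation between the checker state, A's state and B's state
def SimRel (N : Nat) (p : Int × Int × List Int) (a : List Int × List (Int × Int) × Int)
    (b : List Bool × Int × List (Int × Int) × Int) : Prop :=
  a.2.2 = p.1 ∧ b.2.2.2 = p.1 ∧ a.1 = trueIdxFrom b.1 0 ∧ a.2.1 = b.2.2.1 ∧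
  p.2.2 = b.2.2.1.map Prod.fst ∧ p.2.1 = b.2.1 ∧ b.1.length = N ∧
  ((b.2.1 = (cntT b.1 : Int) ∧ GoodR b.1 b.2.2.1.reverse) ∨
   (b.2.1 < 0 ∧ b.1 = [] ∧ b.2.2.1 = []))

theorem trueIdxFrom_false (t : List Bool) (i : Nat) :
    trueIdxFrom (false :: t) i = trueIdxFrom t (i + 1) := rfl

theorem trueIdxFrom_true (t : List Bool) (i : Nat) :
    trueIdxFrom (true :: t) i = (i : Int) :: trueIdxFrom t (i + 1) := rfl

theorem length_trueIdxFrom (l : List Bool) (i : Nat) : (trueIdxFrom l i).length = cntT l := by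
  induction l generalizing i with
  | nil => rfl
  | cons a t ih =>
    cases a
    · rw [trueIdxFrom_false]
      simp [cntT, List.countP_cons, ih]
    · rw [trueIdxFrom_true]
      simp [cntT, List.countP_cons, ih]

theorem selectAlt_spec (l : List Bool) (i : Nat) (k : Int) (hk : 0 ≤ k) :
    (trueIdxFrom l i)[k.toNat]? = (selectAlt l i k).map (fun j => (j : Int)) := by
  induction l generalizing i k with
  | nil => simp [trueIdxFrom, selectAlt]
  | cons a t ih =>
    cases a with
    | false =>
      rw [trueIdxFrom_false]
      simpa [selectAlt] using ih (i + 1) k hk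
    | true =>
      rw [trueIdxFrom_true]
      by_cases h0 : k = 0
      · subst h0; simp [selectAlt]
      · have hk1 : 0 ≤ k - 1 := by omega
        have htn : k.toNat = (k - 1).toNat + 1 := by omega
        simp only [selectAlt, if_true, if_neg h0, htn, List.getElem?_cons_succ]
        exact ih (i + 1) (k - 1) hk1

theorem lt_of_mem_trueIdxFrom (l : List Bool) (i : Nat) (x : Int) (hx : x ∈ trueIdxFrom l i) :
    (i : Int) ≤ x := by
  induction l generalizing i with
  | nil => simp [trueIdxFrom] at hx
  | cons a t ih =>
    cases a with
    | false =>
      rw [trueIdxFrom_false] at hx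
      have := ih (i + 1) hx
      push_cast at this ⊢; omega
    | true =>
      rw [trueIdxFrom_true] at hx
      rcases List.mem_cons.mp hx with h | h
      · omega
      · have := ih (i + 1) h; push_cast at this ⊢; omega

theorem nodup_trueIdxFrom (l : List Bool) (i : Nat) : (trueIdxFrom l i).Nodup := by
  induction l generalizing i with
  | nil => simp [trueIdxFrom]
  | cons a t ih =>
    cases a with
    | false => rw [trueIdxFrom_false]; exact ih (i + 1)
    | true =>
      rw [trueIdxFrom_true]
      refine List.nodup_cons.mpr ⟨fun hmem => ?_, ih (i + 1)⟩
      have := lt_of_mem_trueIdxFrom t (i + 1) (i : Int) hmem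
      push_cast at this; omega

theorem mem_trueIdxFrom (l : List Bool) (i : Nat) (x : Int) :
    x ∈ trueIdxFrom l i ↔ ∃ d : Nat, d < l.length ∧ l[d]? = some true ∧ x = ((i + d : Nat) : Int) := by
  induction l generalizing i with
  | nil => simp [trueIdxFrom]
  | cons a t ih =>
    cases a with
    | false =>
      rw [trueIdxFrom_false, ih (i + 1)]
      constructor
      · rintro ⟨d, hd, ht, rfl⟩
        exact ⟨d + 1, by simpa using hd, by simpa using ht, by push_cast; ring_nf⟩
      · rintro ⟨d, hd, ht, rfl⟩
        cases d with
        | zero => simp at ht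
        | succ d' =>
          exact ⟨d', by simpa using hd, by simpa using ht, by push_cast; ring_nf⟩
    | true =>
      rw [trueIdxFrom_true]
      simp only [List.mem_cons, ih (i + 1)]
      constructor
      · rintro (rfl | ⟨d, hd, ht, rfl⟩)
        · exact ⟨0, by simp, by simp, by simp⟩
        · exact ⟨d + 1, by simpa using hd, by simpa using ht, by push_cast; ring_nf⟩
      · rintro ⟨d, hd, ht, rfl⟩
        cases d with
        | zero => left; simp
        | succ d' =>
          right; exact ⟨d', by simpa using hd, by simpa using ht, by push_cast; ring_nf⟩

-- everything the C step needs about position kn of the live list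
theorem getpos_trueIdxFrom (l : List Bool) (i : Nat) (kn : Nat) (v : Int)
    (h : (trueIdxFrom l i)[kn]? = some v) :
    ∃ d : Nat, v = ((i + d : Nat) : Int) ∧ d < l.length ∧ l[d]? = some true ∧
      (l.take d).countP (fun b => b) = kn ∧
      (trueIdxFrom l i).eraseIdx kn = trueIdxFrom (l.set d false) i := by
  induction l generalizing i kn with
  | nil => simp [trueIdxFrom] at h
  | cons a t ih =>
    cases a with
    | false =>
      rw [trueIdxFrom_false] at h
      obtain ⟨d', hv, hd', ht', hc', he'⟩ := ih (i + 1) kn h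
      refine ⟨d' + 1, by push_cast at hv ⊢; omega, by simpa using hd', by simpa using ht', ?_, ?_⟩
      · simpa [List.countP_cons] using hc'
      · rw [List.set_cons_succ, trueIdxFrom_false, trueIdxFrom_false]
        exact he'
    | true =>
      rw [trueIdxFrom_true] at h
      cases kn with
      | zero =>
        simp only [List.getElem?_cons_zero, Option.some.injEq] at h
        refine ⟨0, by omega, by simp, by simp, by simp, ?_⟩
        rw [List.set_cons_zero, trueIdxFrom_false, trueIdxFrom_true]
        simp
      | succ kn' =>
        simp only [List.getElem?_cons_succ] at h
        obtain ⟨d', hv, hd', ht', hc', he'⟩ := ih (i + 1) kn' h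
        refine ⟨d' + 1, by push_cast at hv ⊢; omega, by simpa using hd', by simpa using ht', ?_, ?_⟩
        · simpa [List.countP_cons] using hc'
        · rw [List.set_cons_succ, trueIdxFrom_true, trueIdxFrom_true, List.eraseIdx_cons_succ, he']


theorem remove?_getElem_nodup {α : Type} [BEq α] [LawfulBEq α] (xs : List α) (kn : Nat) (v : α)
    (hn : xs.Nodup) (h : xs[kn]? = some v) :
    PySem.List.remove? xs v = some (xs.eraseIdx kn) := by
  induction xs generalizing kn with
  | nil => simp at h
  | cons x t ih =>
    cases kn with
    | zero =>
      simp only [List.getElem?_cons_zero, Option.some.injEq] at h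
      subst h; simp [PySem.List.remove?_cons_self]
    | succ kn' =>
      simp only [List.getElem?_cons_succ] at h
      have hv : v ∈ t := List.mem_of_getElem? h
      have hx : x ≠ v := fun he => (List.nodup_cons.mp hn).1 (he ▸ hv)
      rw [PySem.List.remove?_cons_of_ne t hx, ih kn' (List.nodup_cons.mp hn).2 h]
      simp [List.eraseIdx_cons_succ]

-- inserting a dead slot back at its rank is exactly reviving the bit
theorem takeDrop_trueIdxFrom (l : List Bool) (i d : Nat) (h : l[d]? = some false) :
    trueIdxFrom (l.set d true) i =
      (trueIdxFrom l i).take ((l.take d).countP (fun b => b)) ++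
        ((i + d : Nat) : Int) :: (trueIdxFrom l i).drop ((l.take d).countP (fun b => b)) := by
  induction l generalizing i d with
  | nil => simp at h
  | cons a t ih =>
    cases d with
    | zero =>
      simp only [List.getElem?_cons_zero, Option.some.injEq] at h
      subst h
      rw [List.set_cons_zero, trueIdxFrom_true, trueIdxFrom_false]
      simp
    | succ d' =>
      simp only [List.getElem?_cons_succ] at h
      cases a with
      | false =>
        rw [List.set_cons_succ, trueIdxFrom_false, trueIdxFrom_false, ih (i + 1) d' h]
        have : ((i + (d' + 1) : Nat) : Int) = (((i + 1) + d' : Nat) : Int) := by push_cast; ring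
        rw [this]
        simp [List.countP_cons]
      | true =>
        rw [List.set_cons_succ, trueIdxFrom_true, trueIdxFrom_true, ih (i + 1) d' h]
        have : ((i + (d' + 1) : Nat) : Int) = (((i + 1) + d' : Nat) : Int) := by push_cast; ring
        rw [this]
        simp [List.countP_cons]


theorem insert_trueIdxFrom (l : List Bool) (i d : Nat) (hd : d < l.length)
    (h : l[d]? = some false) :
    PySem.List.insert (trueIdxFrom l i) (((l.take d).countP (fun b => b) : Nat) : Int)
      ((i + d : Nat) : Int) = trueIdxFrom (l.set d true) i := by
  have hc : (l.take d).countP (fun b => b) ≤ (trueIdxFrom l i).length := by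
    rw [length_trueIdxFrom]
    exact List.Sublist.countP_le (List.take_sublist d l)
  rw [PySem.List.insert_natCast _ _ _ hc, takeDrop_trueIdxFrom l i d h]

theorem cntT_set_false (l : List Bool) (d : Nat) (h : l[d]? = some true) :
    cntT (l.set d false) + 1 = cntT l := by
  induction l generalizing d with
  | nil => simp at h
  | cons a t ih =>
    cases d with
    | zero => simp at h; subst h; simp [cntT, List.countP_cons]
    | succ d' =>
      have := ih d' (by simpa using h)
      simp only [List.set_cons_succ, cntT, List.countP_cons] at this ⊢
      omega

theorem cntT_set_true (l : List Bool) (d : Nat) (h : l[d]? = some false) :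
    cntT (l.set d true) = cntT l + 1 := by
  induction l generalizing d with
  | nil => simp at h
  | cons a t ih =>
    cases d with
    | zero => simp at h; subst h; simp [cntT, List.countP_cons]
    | succ d' =>
      have := ih d' (by simpa using h)
      simp only [List.set_cons_succ, cntT, List.countP_cons] at this ⊢
      omega


theorem take_set (l : List Bool) (d : Nat) (x : Bool) : (l.set d x).take d = l.take d := by
  induction l generalizing d with
  | nil => simp
  | cons a t ih =>
    cases d with
    | zero => simp
    | succ d' => simp [ih]

theorem set_true_self (l : List Bool) (d : Nat) (h : l[d]? = some true) : l.set d true = l := by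
  have hd : d < l.length := (List.getElem?_eq_some_iff.mp h).1
  have hv : l[d] = true := (List.getElem?_eq_some_iff.mp h).2
  calc l.set d true = l.set d l[d] := by rw [hv]
  _ = l := List.set_getElem_self ..

theorem trueIdxFrom_replicate (m : Nat) (i : Nat) :
    trueIdxFrom (List.replicate m true) i = PySem.List.pyRange (i : Int) ((i : Int) + m) 1 := by
  induction m generalizing i with
  | zero => simp [List.replicate, trueIdxFrom, PySem.List.pyRange_one_eq_nil]
  | succ m' ih =>
    rw [List.replicate_succ, trueIdxFrom_true, ih (i + 1),
      PySem.List.pyRange_one_cons (show (i : Int) < (i : Int) + ((m' + 1 : Nat) : Int) by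
        push_cast; omega)]
    have e1 : (i : Int) + 1 = ((i + 1 : Nat) : Int) := by push_cast; ring
    have e2 : (i : Int) + ((m' + 1 : Nat) : Int) = ((i + 1 : Nat) : Int) + ((m' : Nat) : Int) := by
      push_cast; ring
    rw [e1, e2]


theorem pyRange_init (n : Int) :
    PySem.List.pyRange 0 n 1 = trueIdxFrom (List.replicate n.toNat true) 0 := by
  rw [trueIdxFrom_replicate]
  by_cases h : 0 ≤ n
  · congr 1; push_cast; omega
  · rw [PySem.List.pyRange_one_eq_nil (by omega), PySem.List.pyRange_one_eq_nil (by push_cast; omega)]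


theorem cntT_replicate (m : Nat) : cntT (List.replicate m true) = m := by
  induction m with
  | zero => rfl
  | succ m' ih => simp only [List.replicate_succ, cntT, List.countP_cons] at ih ⊢; simp [ih]


theorem foldl_preStep_none (l : List String) : l.foldl preStep none = none := by
  induction l with
  | nil => rfl
  | cons c t ih => simpa [preStep] using ih

-- one checked command: A's step succeeds, B's parse yields an op whose run succeeds, in simulation
theorem step_rel (N : Nat) (p : Int × Int × List Int) (a : List Int × List (Int × Int) × Int)
    (b : List Bool × Int × List (Int × Int) × Int) (s : String) (h : SimRel N p a b)
    (p' : Int × Int × List Int) (hp : preStep (some p) s = some p') :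
    ∃ c a' b', parseOp s = some c ∧ solArrStep (some a) s = some a' ∧
      runOp (some b) c = some b' ∧ SimRel N p' a' b' := by
  obtain ⟨kp, sz, oks⟩ := p
  obtain ⟨arr, tmp, ka⟩ := a
  obtain ⟨alive, szb, stk, kb⟩ := b
  obtain ⟨pk, psz, poks⟩ := p'
  obtain ⟨hka, hkb, harr, htmp, hoks, hsz, hlen, hdisj⟩ := h
  simp only at hka hkb harr htmp hoks hsz hlen hdisj
  subst ka kb arr tmp oks sz N
  rcases hsp : PySem.Str.split₀ s with _ | ⟨w, _ | ⟨x0, rest⟩⟩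
  · simp [preStep, hsp] at hp
  · -- one token
    by_cases hC : w = "C"
    · -- delete
      subst hC
      by_cases hcond : 0 ≤ kp ∧ kp < szb
      case neg => simp [preStep, hsp, hcond] at hp
      obtain ⟨h0k, hklt⟩ := hcond
      have hX : preStep (some (kp, szb, List.map Prod.fst stk)) s =
          some (if kp = szb - 1 then kp - 1 else kp, szb - 1, List.map Prod.fst stk ++ [kp]) := by
        simp [preStep, hsp, h0k, hklt]
      have hkey := Option.some.inj (hX.symm.trans hp)
      simp only [Prod.mk.injEq] at hkey
      obtain ⟨h1, h2, h3⟩ := hkey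
      subst h1 h2 h3
      rcases hdisj with ⟨hsize, hgood⟩ | ⟨hneg, _, _⟩
      swap
      · omega
      have hkn : kp.toNat < cntT alive := by omega
      have harrlen : (trueIdxFrom alive 0).length = cntT alive := length_trueIdxFrom alive 0
      have hknl : kp.toNat < (trueIdxFrom alive 0).length := by omega
      have hget : (trueIdxFrom alive 0)[kp.toNat]? = some ((trueIdxFrom alive 0)[kp.toNat]) :=
        List.getElem?_eq_getElem hknl
      obtain ⟨d, hvd, hdlt, hdtrue, hcnt, herase⟩ :=
        getpos_trueIdxFrom alive 0 kp.toNat _ hget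
      have hv : (trueIdxFrom alive 0)[kp.toNat] = (d : Int) := by
        rw [hvd]; push_cast; ring
      have hsel := selectAlt_spec alive 0 kp h0k
      rw [hget, hv] at hsel
      rcases hj : selectAlt alive 0 kp with _ | j
      · rw [hj] at hsel; simp at hsel
      rw [hj] at hsel
      have hjd : d = j := by
        simp at hsel
        omega
      subst hjd
      have hpg : PySem.List.pyGet? (trueIdxFrom alive 0) kp = some ((d : Nat) : Int) := by
        rw [PySem.List.pyGet?_of_nonneg_of_lt _ h0k (by omega), hget, hv]
      have hrm : PySem.List.remove? (trueIdxFrom alive 0) ((d : Nat) : Int) =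
          some (trueIdxFrom (alive.set d false) 0) := by
        rw [← herase]
        exact remove?_getElem_nodup _ kp.toNat _ (nodup_trueIdxFrom alive 0) (hv ▸ hget)
      have hlen' : ((trueIdxFrom (alive.set d false) 0).length : Int) = szb - 1 := by
        rw [length_trueIdxFrom]
        have := cntT_set_false alive d hdtrue
        omega
      refine ⟨.cut,
              (trueIdxFrom (alive.set d false) 0, stk ++ [(kp, ((d : Nat) : Int))],
               if kp = szb - 1 then kp - 1 else kp),
              (alive.set d false, szb - 1, stk ++ [(kp, ((d : Nat) : Int))],
               if kp = szb - 1 then kp - 1 else kp), ?_, ?_, ?_, ?_⟩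
      · simp [parseOp, hsp]
      · simp [solArrStep, hsp, hpg, hrm, hlen']
      · simp [runOp, hj]
      · refine ⟨rfl, rfl, rfl, rfl, by simp, rfl, by simp, ?_⟩
        left
        constructor
        · have := cntT_set_false alive d hdtrue
          simp only [List.length_set]
          omega
        · rw [List.reverse_append, List.reverse_singleton, List.singleton_append]
          refine ⟨d, rfl, by simpa using hdlt, List.getElem?_set_self hdlt, ?_, ?_⟩
          · rw [take_set, hcnt]; omega
          · rw [List.set_set, set_true_self alive d hdtrue]
            exact hgood
    · by_cases hZ : w = "Z"
      · -- restore
        subst hZ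
        rcases List.eq_nil_or_concat stk with rfl | ⟨ds, ⟨okL, ovL⟩, rfl⟩
        · simp [preStep, hsp, hC,
            show PySem.List.pop? ([] : List Int) = none from rfl] at hp
        simp only [List.concat_eq_append] at hp hdisj ⊢
        have hX : preStep (some (kp, szb, List.map Prod.fst (ds ++ [(okL, ovL)]))) s =
            some (if okL ≤ kp then kp + 1 else kp, szb + 1, List.map Prod.fst ds) := by
          simp [preStep, hsp, hC, PySem.List.pop?_last]
        have hkey := Option.some.inj (hX.symm.trans hp)
        simp only [Prod.mk.injEq] at hkey
        obtain ⟨h1, h2, h3⟩ := hkey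
        subst h1 h2 h3
        rcases hdisj with ⟨hsize, hgood⟩ | ⟨_, _, habs⟩
        swap
        · simp at habs
        rw [List.reverse_append, List.reverse_singleton, List.singleton_append] at hgood
        obtain ⟨d, hov, hdlt, hdfalse, hok, hgr⟩ :
            ∃ d : Nat, ovL = (d : Int) ∧ d < alive.length ∧ alive[d]? = some false ∧
              okL = (((alive.take d).countP (fun b => b) : Nat) : Int) ∧
              GoodR (alive.set d true) ds.reverse := hgood
        have hins : PySem.List.insert (trueIdxFrom alive 0) okL ovL =
            trueIdxFrom (alive.set d true) 0 := by
          rw [hov, hok]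
          have := insert_trueIdxFrom alive 0 d hdlt hdfalse
          simpa using this
        have hsetD : PySem.List.pySetD alive ovL true = alive.set d true := by
          rw [hov, PySem.List.pySetD_of_nonneg _ _ (by positivity), Int.toNat_natCast]
        refine ⟨.undo,
                (trueIdxFrom (alive.set d true) 0, ds, if okL ≤ kp then kp + 1 else kp),
                (alive.set d true, szb + 1, ds, if okL ≤ kp then kp + 1 else kp), ?_, ?_, ?_, ?_⟩
        · simp [parseOp, hsp, hC]
        · simp [solArrStep, hsp, hC, PySem.List.pop?_last, hins]
        · simp [runOp, PySem.List.pop?_last, hsetD]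
        · refine ⟨rfl, rfl, rfl, rfl, rfl, rfl, by simp, ?_⟩
          left
          constructor
          · have := cntT_set_true alive d hdfalse
            simp only [List.length_set]
            omega
          · exact hgr
      · -- unknown single word: no-op
        have hX : preStep (some (kp, szb, List.map Prod.fst stk)) s =
            some (kp, szb, List.map Prod.fst stk) := by
          simp [preStep, hsp, hC, hZ]
        have hkey := Option.some.inj (hX.symm.trans hp)
        simp only [Prod.mk.injEq] at hkey
        obtain ⟨h1, h2, h3⟩ := hkey
        subst h1 h2 h3
        exact ⟨.nop, (trueIdxFrom alive 0, stk, kp), (alive, szb, stk, kp),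
               by simp [parseOp, hsp, hC, hZ],
               by simp [solArrStep, hsp, hC, hZ], by simp [runOp],
               rfl, rfl, rfl, rfl, rfl, rfl, rfl, hdisj⟩
  · -- two or more tokens: a cursor move (or a no-op word)
    rcases hox : PySem.Int.ofStr? x0 with _ | x
    · simp [preStep, hsp, hox] at hp
    · have step2 : ∀ knew : Int,
          (knew, szb, List.map Prod.fst stk) = (pk, psz, poks) →
          SimRel alive.length (pk, psz, poks)
            (trueIdxFrom alive 0, stk, knew) (alive, szb, stk, knew) := by
        intro knew hh
        simp only [Prod.mk.injEq] at hh
        obtain ⟨h1, h2, h3⟩ := hh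
        subst h1 h2 h3
        exact ⟨rfl, rfl, rfl, rfl, rfl, rfl, rfl, hdisj⟩
      by_cases hD : w = "D"
      · subst hD
        have hX : preStep (some (kp, szb, List.map Prod.fst stk)) s =
            some (kp + x, szb, List.map Prod.fst stk) := by
          simp [preStep, hsp, hox]
        refine ⟨.mov x, (trueIdxFrom alive 0, stk, kp + x), (alive, szb, stk, kp + x),
                by simp [parseOp, hsp, hox],
                by simp [solArrStep, hsp, hox], by simp [runOp], ?_⟩
        exact step2 (kp + x) (Option.some.inj (hX.symm.trans hp))
      · by_cases hU : w = "U"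
        · subst hU
          have hX : preStep (some (kp, szb, List.map Prod.fst stk)) s =
              some (kp - x, szb, List.map Prod.fst stk) := by
            simp [preStep, hsp, hox]
          refine ⟨.mov (-x), (trueIdxFrom alive 0, stk, kp - x), (alive, szb, stk, kp - x),
                  by simp [parseOp, hsp, hox],
                  by simp [solArrStep, hsp, hox],
                  by simp [runOp, Int.sub_eq_add_neg], ?_⟩
          exact step2 (kp - x) (Option.some.inj (hX.symm.trans hp))
        · have hX : preStep (some (kp, szb, List.map Prod.fst stk)) s =
              some (kp, szb, List.map Prod.fst stk) := by
            simp [preStep, hsp, hox, hD, hU]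
          refine ⟨.nop, (trueIdxFrom alive 0, stk, kp), (alive, szb, stk, kp),
                  by simp [parseOp, hsp, hox, hD, hU],
                  by simp [solArrStep, hsp, hox, hD, hU], by simp [runOp], ?_⟩
          exact step2 kp (Option.some.inj (hX.symm.trans hp))

theorem fold_rel (cmds : List String) (N : Nat) (p : Int × Int × List Int)
    (a : List Int × List (Int × Int) × Int) (b : List Bool × Int × List (Int × Int) × Int)
    (h : SimRel N p a b) (p' : Int × Int × List Int)
    (hp : cmds.foldl preStep (some p) = some p') :
    ∃ ops a' b', parseAll cmds = some ops ∧ cmds.foldl solArrStep (some a) = some a' ∧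
      ops.foldl runOp (some b) = some b' ∧ SimRel N p' a' b' := by
  induction cmds generalizing p a b with
  | nil =>
    simp only [List.foldl_nil] at hp ⊢
    obtain rfl := Option.some.inj hp
    exact ⟨[], a, b, rfl, rfl, rfl, h⟩
  | cons c t ih =>
    simp only [List.foldl_cons] at hp ⊢
    rcases hq : preStep (some p) c with _ | q
    · rw [hq, foldl_preStep_none] at hp; cases hp
    · rw [hq] at hp
      obtain ⟨op1, a1, b1, hc1, ha1, hb1, hrel1⟩ := step_rel N p a b c h q hq
      obtain ⟨ops', a', b', hops', ha', hb', hrel'⟩ := ih _ _ _ hrel1 hp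
      refine ⟨op1 :: ops', a', b', ?_, by rw [ha1]; exact ha', ?_, hrel'⟩
      · simp [parseAll, hc1, hops']
      · simp only [List.foldl_cons]
        rw [hb1]; exact hb'

theorem init_rel (n : Int) (k : Int) :
    SimRel n.toNat (k, n, []) (PySem.List.pyRange 0 n 1, [], k)
      (List.replicate n.toNat true, n, [], k) := by
  dsimp only [SimRel]
  refine ⟨rfl, rfl, pyRange_init n, rfl, rfl, rfl, List.length_replicate, ?_⟩
  by_cases h : 0 ≤ n
  · left
    refine ⟨?_, by rw [List.reverse_nil]; trivial⟩
    rw [cntT_replicate]; omega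
  · right
    refine ⟨by omega, ?_, rfl⟩
    have h0 : n.toNat = 0 := by omega
    rw [h0, List.replicate_zero]

theorem out_eq (n : Int) (alive : List Bool) (h : alive.length = n.toNat) :
    String.ofList ((PySem.List.pyRange 0 n 1).foldl
        (fun r i => r ++ (if i ∈ PySem.Set.ofList (trueIdxFrom alive 0) then ['O'] else ['X'])) [])
      = String.ofList (alive.map (fun a => if a then 'O' else 'X')) := by
  congr 1
  have hbody : (fun (r : List Char) (i : Int) =>
      r ++ (if i ∈ PySem.Set.ofList (trueIdxFrom alive 0) then ['O'] else ['X'])) =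
      (fun (r : List Char) (i : Int) =>
      r ++ [if i ∈ PySem.Set.ofList (trueIdxFrom alive 0) then 'O' else 'X']) := by
    funext r i
    by_cases hi : i ∈ PySem.Set.ofList (trueIdxFrom alive 0) <;> simp [hi]
  rw [hbody, PySem.List.foldl_append_singleton_eq_map, List.nil_append,
    PySem.List.pyRange_one]
  apply List.ext_getElem
  · simpa using by omega
  · intro j hj1 hj2
    simp only [List.getElem_map, List.getElem_range]
    have hjlen : j < alive.length := by simpa using hj2
    have hmem : ((0 : Int) + (j : Int)) ∈ trueIdxFrom alive 0 ↔ alive[j] = true := by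
      rw [mem_trueIdxFrom]
      constructor
      · rintro ⟨d, hd, ht, he⟩
        have : j = d := by omega
        subst this
        rw [List.getElem?_eq_getElem hjlen] at ht
        exact Option.some.inj ht
      · intro hT
        exact ⟨j, hjlen, by rw [List.getElem?_eq_getElem hjlen, hT], by omega⟩
    by_cases hT : alive[j] = true
    · rw [if_pos ((PySem.Set.mem_ofList _ _).mpr (hmem.mpr hT)), if_pos hT]
    · rw [if_neg (fun hc => hT (hmem.mp ((PySem.Set.mem_ofList _ _).mp hc))), if_neg hT]

-- ===== VERDICT (by name: the statement is the Claim_ definition above) =====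
theorem solution_spec : Claim_equal_solution := by
  intro n k cmd _ hpre
  unfold Pre_solution at hpre
  rcases hp' : cmd.foldl preStep (some (k, n, [])) with _ | p'
  · rw [hp'] at hpre; cases hpre
  · obtain ⟨ops, a', b', hops, ha', hb', hrel⟩ := fold_rel cmd n.toNat _ _ _ (init_rel n k) p' hp'
    unfold Spec_solution solution solution_alt
    rw [ha', hops]
    dsimp only
    rw [hb']
    obtain ⟨arr, tmp, ka⟩ := a'
    obtain ⟨alive, size, stk, kb⟩ := b'
    obtain ⟨_, _, harr, _, _, _, hlen, _⟩ := hrel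
    have harr' : arr = trueIdxFrom alive 0 := harr
    subst harr'
    exact out_eq n alive hlen
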